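-- pv_equiv track=rewrite | github.com/metaflow-ai/BoobaBot | util.py | get_regions_from_corpus
-- ===== SOURCE A (Python) =====
-- def get_regions_from_corpus(corpus):
--     regions = []
--     region = []
--     for word in corpus:
--         region.append(word)
--         if word == '<EOP>':
--             regions.append(region)
--             region = []
--
--     return regions
-- ===== SOURCE B (Python) =====
-- def get_regions_from_corpus(corpus):
--     lst = list(corpus)
--     regions = []
--     while True:
--         try:
--             i = lst.index('<EOP>')
--         except ValueError:
--             return regions
--         regions.append(lst[:i + 1])
--         lst = lst[i + 1:]
-- ===== Notes on version B (the rewrite author's own statement) =====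
-- stated objective: alternative
-- what changed: Replaces the word-by-word accumulator loop with a repeated-index-and-slice decomposition: find the next '<EOP>' with list.index, slice off that region, and recurse on the remainder; trailing words after the last marker are never touched.
import Mathlib
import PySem

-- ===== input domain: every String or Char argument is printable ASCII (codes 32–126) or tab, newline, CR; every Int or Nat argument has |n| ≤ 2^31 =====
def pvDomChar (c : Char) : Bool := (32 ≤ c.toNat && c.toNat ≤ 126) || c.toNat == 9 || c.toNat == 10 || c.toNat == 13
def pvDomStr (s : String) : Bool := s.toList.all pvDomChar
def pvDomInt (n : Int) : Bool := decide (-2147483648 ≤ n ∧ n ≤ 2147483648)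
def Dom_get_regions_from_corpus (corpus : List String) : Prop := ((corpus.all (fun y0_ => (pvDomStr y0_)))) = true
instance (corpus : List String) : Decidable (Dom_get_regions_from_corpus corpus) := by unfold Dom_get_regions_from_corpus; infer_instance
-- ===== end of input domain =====

-- B replaces A's word-by-word accumulator loop by repeatedly finding the next '<EOP>' with
-- list.index and slicing off that region (alternative decomposition, same cost).


-- ===== PORT A =====
-- A: fold over the words carrying (regions, region); flush region at each '<EOP>'.
-- The loop body is the named step function get_regions_from_corpus_step.
def get_regions_from_corpus_step (st : List (List String) × List String) (word : String) :
    List (List String) × List String :=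
  let region := st.2 ++ [word]
  if word == "<EOP>" then (st.1 ++ [region], ([] : List String)) else (st.1, region)

def get_regions_from_corpus (corpus : List String) : List (List String) :=
  (corpus.foldl get_regions_from_corpus_step
    (([] : List (List String)), ([] : List String))).1

-- ===== PORT B =====
-- B's while loop: find the next '<EOP>' (lst.index → PySem.List.index?; ValueError = none ends
-- the loop), append the slice lst[:i+1] (= take (i+1), exact for this natural bound) and continue
-- on lst[i+1:] (= drop (i+1)).
def get_regions_from_corpus_altGo (regions : List (List String)) (lst : List String) :
    List (List String) :=
  match h : PySem.List.index? lst "<EOP>" with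
  | none => regions
  | some i => get_regions_from_corpus_altGo (regions ++ [lst.take (i + 1)]) (lst.drop (i + 1))
termination_by lst.length
decreasing_by
  obtain ⟨hk, -, -⟩ := PySem.List.getElem_of_index?_eq_some h
  simp only [List.length_drop]; omega

def get_regions_from_corpus_alt (corpus : List String) : List (List String) :=
  get_regions_from_corpus_altGo [] corpus

-- ===== PRECONDITION & SPEC =====
def Spec_get_regions_from_corpus (corpus : List String) (out : List (List String)) : Prop := out = get_regions_from_corpus_alt corpus
instance (corpus : List String) (out : List (List String)) : Decidable (Spec_get_regions_from_corpus corpus out) := by unfold Spec_get_regions_from_corpus; infer_instance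

-- ===== CLAIM (what is proved, stated in full; the proofs are below) =====
def Claim_equal_get_regions_from_corpus : Prop := ∀ (corpus : List String), Dom_get_regions_from_corpus corpus → Spec_get_regions_from_corpus corpus (get_regions_from_corpus corpus)

-- ===== LEMMAS AND PROOFS =====

-- Reference splitter: both programs compute this.
def regSplit (pre : List String) : List String → List (List String)
  | [] => []
  | w :: ws => if w = "<EOP>" then (pre ++ [w]) :: regSplit [] ws else regSplit (pre ++ [w]) ws

theorem stepA_eop (acc : List (List String)) (pre : List String) :
    get_regions_from_corpus_step (acc, pre) "<EOP>" = (acc ++ [pre ++ ["<EOP>"]], []) := rfl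

theorem stepA_ne (acc : List (List String)) (pre : List String) {w : String} (hw : w ≠ "<EOP>") :
    get_regions_from_corpus_step (acc, pre) w = (acc, pre ++ [w]) := by
  simp [get_regions_from_corpus_step, hw]

theorem foldlA_eq_regSplit (ws : List String) (acc : List (List String)) (pre : List String) :
    (ws.foldl get_regions_from_corpus_step (acc, pre)).1 = acc ++ regSplit pre ws := by
  induction ws generalizing acc pre with
  | nil => simp [regSplit]
  | cons w ws ih =>
    rcases eq_or_ne w "<EOP>" with hw | hw
    · subst hw
      rw [List.foldl_cons, stepA_eop]
      exact (ih (acc ++ [pre ++ ["<EOP>"]]) []).trans (by rw [regSplit, if_pos rfl]; simp)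
    · rw [List.foldl_cons, stepA_ne acc pre hw, regSplit, if_neg hw]
      exact ih acc (pre ++ [w])

theorem regSplit_eq_index (ws : List String) (pre : List String) :
    regSplit pre ws =
      match PySem.List.index? ws "<EOP>" with
      | none => []
      | some i => (pre ++ ws.take (i + 1)) :: regSplit [] (ws.drop (i + 1)) := by
  induction ws generalizing pre with
  | nil => simp [regSplit, PySem.List.index?]
  | cons w ws ih =>
    by_cases hw : w = "<EOP>"
    · subst hw
      rw [PySem.List.index?_cons_self]
      simp [regSplit]
    · rw [PySem.List.index?_cons_of_ne ws hw]
      simp only [regSplit, if_neg hw, ih (pre ++ [w])]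
      cases PySem.List.index? ws "<EOP>" with
      | none => rfl
      | some i => simp [List.append_assoc]

theorem altGo_eq_regSplit (ws : List String) (acc : List (List String)) :
    get_regions_from_corpus_altGo acc ws = acc ++ regSplit [] ws := by
  rw [regSplit_eq_index]
  unfold get_regions_from_corpus_altGo
  split
  · next h => rw [h]; simp
  · next i h =>
    obtain ⟨hk, -, -⟩ := PySem.List.getElem_of_index?_eq_some h
    rw [h, altGo_eq_regSplit (ws.drop (i + 1))]
    simp
termination_by ws.length
decreasing_by
  simp only [List.length_drop]; omega

-- ===== VERDICT (by name: the statement is the Claim_ definition above) =====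
theorem get_regions_from_corpus_spec : Claim_equal_get_regions_from_corpus := by
  intro corpus _
  unfold Spec_get_regions_from_corpus get_regions_from_corpus get_regions_from_corpus_alt
  rw [foldlA_eq_regSplit, altGo_eq_regSplit]
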